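-- pv_equiv track=rewrite | github.com/Jumumu/ConvertOneNote2MarkDown | fix_code_block_backslashes.py | process_note
-- ===== SOURCE A (Python) =====
-- CODE_BLOCK_BACKTICK_COUNT: int = 3
--
-- def process_note(text: str) -> str:
--     """Removes erroneous backslashes inside code blocks.
--
--     Any backslashes preceding opening or closing angle brackets inside of a code
--     block will be removed.
--
--     Parameters
--     ----------
--     text : str
--         The text to process.
--
--     Returns
--     -------
--     str
--         The modified text.
--     """
--     modified_text = ""
--     consecutive_backticks = 0
--     in_code_block = False
--     char_idx = 0
--
--     for c in text:
--         if c == "`":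
--             consecutive_backticks += 1
--         else:
--             if consecutive_backticks == CODE_BLOCK_BACKTICK_COUNT:
--                 in_code_block = not in_code_block
--             consecutive_backticks = 0
--
--         if in_code_block:
--             if c == "\\" and char_idx < len(text) - 1:
--                 # Only perform a backslash replacement when the next character
--                 # is an opening or closing angle bracket
--                 if text[char_idx + 1] == "<" or text[char_idx + 1] == ">":
--                     char_idx += 1
--                     continue
--
--         modified_text += c
--         char_idx += 1
--
--     return modified_text
-- ===== SOURCE B (Python) =====
-- def process_note(text: str) -> str:
--     """Two-pass version: pass 1 runs only the fence state machine to mark which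
--     indices are inside a code block; pass 2 drops backslashes that precede an
--     angle bracket at marked positions."""
--     n = len(text)
--     in_block = []
--     ticks = 0
--     flag = False
--     for c in text:
--         if c == "`":
--             ticks += 1
--         else:
--             if ticks == 3:
--                 flag = not flag
--             ticks = 0
--         in_block.append(flag)
--     out = []
--     for i, c in enumerate(text):
--         if in_block[i] and c == "\\" and i + 1 < n and (text[i + 1] == "<" or text[i + 1] == ">"):
--             continue
--         out.append(c)
--     return "".join(out)
-- ===== Notes on version B (the rewrite author's own statement) =====
-- stated objective: alternative
-- what changed: A's single fused loop (fence state machine interleaved with output building and look-ahead deletion) is split into two independent passes: pass 1 runs only the fence state machine to mark in-block indices, pass 2 filters out marked backslashes preceding angle brackets and joins the result.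
import Mathlib
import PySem

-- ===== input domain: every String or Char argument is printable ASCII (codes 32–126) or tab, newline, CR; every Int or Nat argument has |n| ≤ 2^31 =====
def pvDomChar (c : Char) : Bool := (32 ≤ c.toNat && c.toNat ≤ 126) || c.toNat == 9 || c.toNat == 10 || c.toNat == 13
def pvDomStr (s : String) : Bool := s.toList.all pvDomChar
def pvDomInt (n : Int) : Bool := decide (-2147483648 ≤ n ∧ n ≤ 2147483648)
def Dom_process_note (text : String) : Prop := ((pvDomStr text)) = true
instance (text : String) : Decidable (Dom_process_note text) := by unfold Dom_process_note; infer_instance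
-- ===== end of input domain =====

-- B replaces A's single fused loop by two passes (fence flags first, then filtering); objective: alternative decomposition, same cost.

-- ===== PORT A =====
-- A's single for-loop: state (modified_text, consecutive_backticks, in_code_block, char_idx).
def pvALoop (text : List Char) : List Char → List Char → Int → Bool → Int → List Char
  | [], m, _, _, _ => m
  | c :: cs, m, ticks, inb, idx =>
    let ticks' : Int := if c = '`' then ticks + 1 else 0
    let inb' : Bool := if c = '`' then inb else (if ticks = 3 then !inb else inb)
    if inb' && (c = '\\' : Bool) && decide (idx < (text.length : Int) - 1) &&
        (PySem.List.pyGet? text (idx + 1) == some '<' || PySem.List.pyGet? text (idx + 1) == some '>')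
    then pvALoop text cs m ticks' inb' (idx + 1)
    else pvALoop text cs (m ++ [c]) ticks' inb' (idx + 1)

def process_note (text : String) : String :=
  String.ofList (pvALoop text.toList text.toList [] 0 false 0)

-- ===== PORT B =====
-- B pass 1: the fence state machine alone, recording the post-update flag at every index.
def pvFlags : List Char → Int → Bool → List Bool
  | [], _, _ => []
  | c :: cs, ticks, flag =>
    let ticks' : Int := if c = '`' then ticks + 1 else 0
    let flag' : Bool := if c = '`' then flag else (if ticks = 3 then !flag else flag)
    flag' :: pvFlags cs ticks' flag'

-- B pass 2: drop a marked backslash when the next character is an angle bracket.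
def pvFilter (text : List Char) : List (Char × Bool) → Int → List Char
  | [], _ => []
  | (c, f) :: rest, i =>
    if f && (c = '\\' : Bool) && decide (i + 1 < (text.length : Int)) &&
        (PySem.List.pyGet? text (i + 1) == some '<' || PySem.List.pyGet? text (i + 1) == some '>')
    then pvFilter text rest (i + 1)
    else c :: pvFilter text rest (i + 1)

def process_note_alt (text : String) : String :=
  let tl := text.toList
  String.ofList (pvFilter tl (tl.zip (pvFlags tl 0 false)) 0)

-- ===== PRECONDITION & SPEC =====
def Spec_process_note (text : String) (out : String) : Prop := out = process_note_alt text
instance (text : String) (out : String) : Decidable (Spec_process_note text out) := by unfold Spec_process_note; infer_instance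

-- ===== CLAIM (what is proved, stated in full; the proofs are below) =====
def Claim_equal_process_note : Prop := ∀ (text : String), Dom_process_note text → Spec_process_note text (process_note text)

-- ===== LEMMAS AND PROOFS =====

-- Fused loop = flags pass followed by filter pass, for any suffix and matching state.
theorem pvALoop_eq_filter (text : List Char) :
    ∀ (rest m : List Char) (ticks : Int) (inb : Bool) (idx : Int),
      pvALoop text rest m ticks inb idx
        = m ++ pvFilter text (rest.zip (pvFlags rest ticks inb)) idx := by
  intro rest
  induction rest with
  | nil => intro m ticks inb idx; simp [pvALoop, pvFlags, pvFilter]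
  | cons c cs ih =>
    intro m ticks inb idx
    simp only [pvALoop, pvFlags, List.zip_cons_cons, pvFilter]
    have hcond : decide (idx < (text.length : Int) - 1) = decide (idx + 1 < (text.length : Int)) := by
      simp only [decide_eq_decide]; omega
    rw [hcond]
    split <;> split <;> simp [ih] <;> split <;> simp

-- ===== VERDICT (by name: the statement is the Claim_ definition above) =====
theorem process_note_spec : Claim_equal_process_note := by
  intro text _
  unfold Spec_process_note process_note process_note_alt
  rw [pvALoop_eq_filter]
  simp
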